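-- pv_equiv track=rewrite | github.com/evonnec/pair_artists | artist_pairs.py | make_artist_pairs
-- ===== SOURCE A (Python) =====
-- from typing import List, Tuple, DefaultDict, Set
--
-- def make_artist_pairs(
--     potential_pairs: DefaultDict[str, Set[int]],
--     pair_num: int
--     ) -> List[Tuple[str, str]]:
--     pair_tuple = []
--     for k, v in potential_pairs.items():
--         for key, value in potential_pairs.items():
--             if key != k and len(v.intersection(value)) >= pair_num:
--                 pair_tuple.append((k, key))
--     return pair_tuple
-- ===== SOURCE B (Python) =====
-- def make_artist_pairs(potential_pairs, pair_num):
--     # Inverted index: for each artist id, the positions of the artists containing it;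
--     # then per artist a co-occurrence counter replaces the per-pair set intersections.
--     items = list(potential_pairs.items())
--     index = {}
--     for i, (k, v) in enumerate(items):
--         for x in v:
--             index.setdefault(x, []).append(i)
--     out = []
--     for i, (k, v) in enumerate(items):
--         cnt = {}
--         for x in v:
--             for q in index.get(x, []):
--                 cnt[q] = cnt.get(q, 0) + 1
--         for j, (key, _) in enumerate(items):
--             if j != i and cnt.get(j, 0) >= pair_num:
--                 out.append((k, key))
--     return out
-- ===== Notes on version B (the rewrite author's own statement) =====
-- stated objective: faster
-- what changed: Instead of computing a set intersection for every ordered pair (O(n^2*s)), B builds an inverted index id->positions once and, per artist, a co-occurrence counter over that index, so the inner pair loop does a single O(1) dict lookup.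
import Mathlib
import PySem

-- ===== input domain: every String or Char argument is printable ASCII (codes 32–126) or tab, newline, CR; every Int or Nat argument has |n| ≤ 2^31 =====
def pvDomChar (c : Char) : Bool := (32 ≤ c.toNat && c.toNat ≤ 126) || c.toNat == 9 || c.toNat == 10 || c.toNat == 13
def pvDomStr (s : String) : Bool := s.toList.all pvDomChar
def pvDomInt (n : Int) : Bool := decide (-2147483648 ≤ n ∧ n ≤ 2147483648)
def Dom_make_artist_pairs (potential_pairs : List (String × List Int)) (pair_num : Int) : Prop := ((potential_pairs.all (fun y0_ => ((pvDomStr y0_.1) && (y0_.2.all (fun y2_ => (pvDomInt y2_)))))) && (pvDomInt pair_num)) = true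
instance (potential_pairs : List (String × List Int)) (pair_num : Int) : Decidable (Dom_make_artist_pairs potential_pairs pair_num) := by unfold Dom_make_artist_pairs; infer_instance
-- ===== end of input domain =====

-- B replaces A's per-pair set intersections by an inverted index (id -> artist positions) and
-- per-artist co-occurrence counters, so the pair loop does a single counter lookup (objective: faster).

-- Both ports receive the Python argument `potential_pairs : dict[str, set[int]]` as an association
-- list; this helper models that conversion exactly (dict: first position, last value wins; set:
-- distinct elements) and yields the dict's items, which is what both Pythons iterate over.
def pyDictItems (potential_pairs : List (String × List Int)) : List (String × PySem.Set Int) :=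
  (potential_pairs.foldl (fun d kv => d.insert kv.1 (PySem.Set.ofList kv.2)) PySem.Dict.empty).items

-- ===== PORT A =====
def make_artist_pairs (potential_pairs : List (String × List Int)) (pair_num : Int) : List (String × String) :=
  let items := pyDictItems potential_pairs
  items.foldl (fun pair_tuple kv =>
    items.foldl (fun pair_tuple kv' =>
      if kv'.1 ≠ kv.1 ∧ PySem.Set.len (PySem.Set.inter kv.2 kv'.2) ≥ pair_num then
        pair_tuple ++ [(kv.1, kv'.1)]
      else pair_tuple) pair_tuple) []

-- ===== PORT B =====
-- index.setdefault(x, []).append(i) over all i, x in v   (inverted index: id -> positions)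
def pvIndex (items : List (String × PySem.Set Int)) : PySem.Dict Int (List Int) :=
  (PySem.List.enumerate items).foldl (fun idx p =>
    p.2.2.foldl (fun idx x => idx.modify x [] (· ++ [p.1])) idx) PySem.Dict.empty

-- cnt[q] = cnt.get(q, 0) + 1 over all x in v, q in index.get(x, [])   (co-occurrence counter)
def pvCnt (index : PySem.Dict Int (List Int)) (v : PySem.Set Int) : PySem.Dict Int Int :=
  v.foldl (fun c x => (index.getD x []).foldl (fun c q => c.modify q 0 (· + 1)) c) PySem.Dict.empty

def make_artist_pairs_alt (potential_pairs : List (String × List Int)) (pair_num : Int) : List (String × String) :=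
  let items := pyDictItems potential_pairs
  let index := pvIndex items
  (PySem.List.enumerate items).foldl (fun out p =>
    let cnt := pvCnt index p.2.2
    (PySem.List.enumerate items).foldl (fun out q =>
      if q.1 ≠ p.1 ∧ cnt.getD q.1 0 ≥ pair_num then out ++ [(p.2.1, q.2.1)] else out) out) []

-- ===== PRECONDITION & SPEC =====
def Spec_make_artist_pairs (potential_pairs : List (String × List Int)) (pair_num : Int) (out : List (String × String)) : Prop := out = make_artist_pairs_alt potential_pairs pair_num
instance (potential_pairs : List (String × List Int)) (pair_num : Int) (out : List (String × String)) : Decidable (Spec_make_artist_pairs potential_pairs pair_num out) := by unfold Spec_make_artist_pairs; infer_instance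

-- ===== CLAIM (what is proved, stated in full; the proofs are below) =====
def Claim_equal_make_artist_pairs : Prop := ∀ (potential_pairs : List (String × List Int)) (pair_num : Int), Dom_make_artist_pairs potential_pairs pair_num → Spec_make_artist_pairs potential_pairs pair_num (make_artist_pairs potential_pairs pair_num)

-- ===== LEMMAS AND PROOFS =====

-- A nested append loop is a flatMap of filtered maps.
theorem pv_nested_loop {α β : Type} (l l' : List α) (P : α → α → Prop) [∀ a b : α, Decidable (P a b)]
    (f : α → α → β) (init : List β) :
    l.foldl (fun acc a => l'.foldl (fun acc b => if P a b then acc ++ [f a b] else acc) acc) init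
      = init ++ l.flatMap (fun a => (l'.filter (fun b => decide (P a b))).map (f a)) := by
  induction l generalizing init with
  | nil => simp
  | cons a l ih =>
    rw [List.foldl_cons, ih, PySem.List.foldl_append_ite (P a) (f a) l' init]
    simp

-- Keys of the dict's items are pairwise distinct.
theorem pv_keys_nodup (pp : List (String × List Int)) : ((pyDictItems pp).map (fun kv => kv.1)).Nodup := by
  have h := PySem.Dict.nodup_keys_foldl_insert_key pp (fun kv => kv.1)
      (fun _ kv => PySem.Set.ofList kv.2) PySem.Dict.empty PySem.Dict.nodup_keys_empty
  simpa [PySem.Dict.keys] using h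

-- Every stored value list is duplicate-free (they are sets).
theorem pv_vals_nodup (pp : List (String × List Int)) :
    ∀ kv ∈ pyDictItems pp, kv.2.Nodup := by
  unfold pyDictItems
  suffices h : ∀ (l : List (String × List Int)) (d : PySem.Dict String (PySem.Set Int)),
      (∀ kv ∈ d.items, kv.2.Nodup) →
      ∀ kv ∈ (l.foldl (fun d kv => d.insert kv.1 (PySem.Set.ofList kv.2)) d).items, kv.2.Nodup by
    exact h pp PySem.Dict.empty (by simp [PySem.Dict.empty])
  intro l
  induction l with
  | nil => intro d hd; simpa using hd
  | cons a l ih =>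
    intro d hd
    rw [List.foldl_cons]
    refine ih _ ?_
    intro kv hkv
    rcases (PySem.Dict.mem_items_insert d a.1 (PySem.Set.ofList a.2) kv).mp hkv with h | h
    · subst h; exact PySem.Set.nodup_ofList a.2
    · exact hd kv h.1

-- Effect of one artist's inner index loop on a single id's position list.
theorem pv_idx_inner (v : List Int) (i : Int) (d : PySem.Dict Int (List Int)) (x : Int) :
    ((v.foldl (fun d y => d.modify y [] (· ++ [i])) d).getD x [])
      = d.getD x [] ++ List.replicate ((v.filter (fun y => y == x)).length) i := by
  induction v generalizing d with
  | nil => simp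
  | cons y v ih =>
    rw [List.foldl_cons, ih, PySem.Dict.getD_modify, List.filter_cons]
    by_cases hxy : x = y
    · simp [hxy, List.replicate_succ]
    · have : ¬ ((y == x) = true) := by simp [Ne.symm hxy]
      simp [hxy, this]

-- Multiplicity of position j in the index entry for id x.
theorem pv_idx_count (l : List (String × PySem.Set Int)) (s : Int) (d : PySem.Dict Int (List Int)) (x j : Int) :
    (((PySem.List.enumerate l s).foldl (fun idx p =>
        p.2.2.foldl (fun idx y => idx.modify y [] (· ++ [p.1])) idx) d).getD x []).count j
      = (d.getD x []).count j
        + ((PySem.List.enumerate l s).map (fun p => if p.1 = j then p.2.2.count x else 0)).sum := by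
  induction l generalizing s d with
  | nil => simp [PySem.List.enumerate_nil]
  | cons a l ih =>
    rw [PySem.List.enumerate_cons, List.foldl_cons, ih]
    have hinner : ((a.2.foldl (fun d y => d.modify y [] (· ++ [s])) d).getD x []).count j
        = (d.getD x []).count j + (if s = j then a.2.count x else 0) := by
      rw [pv_idx_inner]
      have hrep : (List.replicate ((a.2.filter (fun y => y == x)).length) s).count j
          = if s = j then a.2.count x else 0 := by
        rw [List.count_replicate]
        have hlen : (a.2.filter (fun y => y == x)).length = a.2.count x := by
          rw [List.count, List.countP_eq_length_filter]
        split_ifs with h1 h2 h2 <;> simp_all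
      rw [List.count_append, hrep]
    simp only [List.map_cons, List.sum_cons, hinner]
    omega

-- Summing an indicator over enumerate picks out the unique entry with first component j.
theorem pv_sum_ite_unique {β : Type} (L : List (Int × β)) (f : Int × β → Nat)
    (hn : (L.map (fun q => q.1)).Nodup) (p : Int × β) (hp : p ∈ L) :
    (L.map (fun q => if q.1 = p.1 then f q else 0)).sum = f p := by
  induction L with
  | nil => cases hp
  | cons a L ih =>
    rw [List.map_cons] at hn
    rcases List.nodup_cons.mp hn with ⟨ha, hL⟩
    rcases List.mem_cons.mp hp with h | h
    · subst h
      have hz : ∀ q ∈ L, (if q.1 = p.1 then f q else 0) = 0 := by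
        intro q hq
        have : q.1 ≠ p.1 := by
          intro he; exact ha (he ▸ List.mem_map_of_mem hq)
        simp [this]
      have hzero : (L.map (fun q => if q.1 = p.1 then f q else 0)).sum = 0 := by
        apply List.sum_eq_zero; intro x hx
        rcases List.mem_map.mp hx with ⟨q, hq, rfl⟩
        exact hz q hq
      simp only [List.map_cons, List.sum_cons, hzero]
      simp
    · have hne : a.1 ≠ p.1 := by
        intro he; exact ha (he ▸ List.mem_map_of_mem h)
      simp only [List.map_cons, List.sum_cons, if_neg hne]
      rw [ih hL h]
      omega

-- The counter value at position j is the total multiplicity of j over v's index entries.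
theorem pv_cnt_getD (index : PySem.Dict Int (List Int)) (v : List Int) (j : Int) :
    (pvCnt index v).getD j 0 = (v.map (fun x => (((index.getD x []).count j : Int)))).sum := by
  unfold pvCnt
  suffices h : ∀ (v : List Int) (c : PySem.Dict Int Int),
      ((v.foldl (fun c x => (index.getD x []).foldl (fun c q => c.modify q 0 (· + 1)) c) c).getD j 0)
        = c.getD j 0 + (v.map (fun x => (((index.getD x []).count j : Int)))).sum by
    simpa using h v PySem.Dict.empty
  intro v
  induction v with
  | nil => simp
  | cons x v ih =>
    intro c
    rw [List.foldl_cons, ih, PySem.Dict.getD_foldl_modify_add_one, List.map_cons, List.sum_cons]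
    ring

-- ===== Putting the pieces together =====

theorem pv_portA_eq (pp : List (String × List Int)) (pn : Int) :
    make_artist_pairs pp pn
      = (pyDictItems pp).flatMap (fun kv =>
          ((pyDictItems pp).filter (fun kv' =>
            decide (kv'.1 ≠ kv.1 ∧ PySem.Set.len (PySem.Set.inter kv.2 kv'.2) ≥ pn))).map
            (fun kv' => (kv.1, kv'.1))) := by
  show (pyDictItems pp).foldl _ [] = _
  rw [pv_nested_loop (pyDictItems pp) (pyDictItems pp)
      (fun kv kv' => kv'.1 ≠ kv.1 ∧ PySem.Set.len (PySem.Set.inter kv.2 kv'.2) ≥ pn)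
      (fun kv kv' => (kv.1, kv'.1)) []]
  simp

theorem pv_portB_eq (pp : List (String × List Int)) (pn : Int) :
    make_artist_pairs_alt pp pn
      = (PySem.List.enumerate (pyDictItems pp)).flatMap (fun p =>
          ((PySem.List.enumerate (pyDictItems pp)).filter (fun q =>
            decide (q.1 ≠ p.1 ∧ (pvCnt (pvIndex (pyDictItems pp)) p.2.2).getD q.1 0 ≥ pn))).map
            (fun q => (p.2.1, q.2.1))) := by
  show (PySem.List.enumerate (pyDictItems pp)).foldl _ [] = _
  rw [pv_nested_loop (PySem.List.enumerate (pyDictItems pp)) (PySem.List.enumerate (pyDictItems pp))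
      (fun p q => q.1 ≠ p.1 ∧ (pvCnt (pvIndex (pyDictItems pp)) p.2.2).getD q.1 0 ≥ pn)
      (fun p q => (p.2.1, q.2.1)) []]
  simp

-- Index positions of enumerate are pairwise distinct.
theorem pv_enum_fst_nodup {α : Type} (xs : List α) (s : Int) :
    ((PySem.List.enumerate xs s).map (fun q => q.1)).Nodup := by
  have h := PySem.List.pairwise_lt_enumerate xs s
  have h2 : (((PySem.List.enumerate xs s)).map (fun q => q.1)).Pairwise (fun a b : Int => a < b) :=
    List.Pairwise.map _ (fun a b hab => hab) h
  exact List.Pairwise.imp (fun hab => ne_of_lt hab) h2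

-- For an entry (j, kv) of enumerate items, the index's list for id x contains j with multiplicity kv.2.count x.
theorem pv_idx_count_at (items : List (String × PySem.Set Int)) (q : Int × (String × PySem.Set Int))
    (hq : q ∈ PySem.List.enumerate items 0) (x : Int) :
    ((pvIndex items).getD x []).count q.1 = q.2.2.count x := by
  unfold pvIndex
  rw [pv_idx_count items 0 PySem.Dict.empty x q.1]
  rw [PySem.Dict.getD_empty]
  simp only [List.count_nil, Nat.zero_add]
  exact pv_sum_ite_unique (PySem.List.enumerate items 0) (fun p => p.2.2.count x)
    (pv_enum_fst_nodup items 0) q hq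

-- The counter equals the intersection size, for entries of the dict's items.
theorem pv_cnt_eq_inter (pp : List (String × List Int))
    (p q : Int × (String × PySem.Set Int))
    (hq : q ∈ PySem.List.enumerate (pyDictItems pp) 0) :
    (pvCnt (pvIndex (pyDictItems pp)) p.2.2).getD q.1 0
      = PySem.Set.len (PySem.Set.inter p.2.2 q.2.2) := by
  have hqmem : q.2 ∈ pyDictItems pp := by
    have := congrArg (fun L => q.2 ∈ L) (PySem.List.map_snd_enumerate (pyDictItems pp) 0)
    simp only [eq_iff_iff] at this
    exact this.mp (List.mem_map_of_mem hq)
  have hnd : q.2.2.Nodup := pv_vals_nodup pp q.2 hqmem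
  rw [pv_cnt_getD]
  have hpt : ∀ x : Int, (((pvIndex (pyDictItems pp)).getD x []).count q.1 : Int)
      = if q.2.2.contains x = true then (1 : Int) else 0 := by
    intro x
    rw [pv_idx_count_at (pyDictItems pp) q hq x]
    by_cases hx : x ∈ q.2.2
    · rw [List.count_eq_one_of_mem hnd hx, if_pos ((PySem.Set.contains_iff q.2.2 x).mpr hx)]
      norm_num
    · rw [List.count_eq_zero.mpr hx,
        if_neg (fun hc => hx ((PySem.Set.contains_iff q.2.2 x).mp hc))]
      norm_num
  rw [List.map_congr_left (fun x _ => hpt x)]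
  rw [PySem.List.sum_map_ite_one_zero (fun x => q.2.2.contains x) p.2.2]
  simp only [PySem.Set.len, PySem.Set.inter]
  rw [List.countP_eq_length_filter]

-- Two entries of enumerate items carry distinct keys iff they sit at distinct positions.
theorem pv_key_iff (pp : List (String × List Int)) (p q : Int × (String × PySem.Set Int))
    (hp : p ∈ PySem.List.enumerate (pyDictItems pp) 0)
    (hq : q ∈ PySem.List.enumerate (pyDictItems pp) 0) :
    (q.2.1 ≠ p.2.1) ↔ (q.1 ≠ p.1) := by
  rcases (PySem.List.mem_enumerate_iff _ _ _).mp hp with ⟨k, hk, rfl⟩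
  rcases (PySem.List.mem_enumerate_iff _ _ _).mp hq with ⟨m, hm, rfl⟩
  have hnd := pv_keys_nodup pp
  have key : (pyDictItems pp)[m].1 = (pyDictItems pp)[k].1 ↔ m = k := by
    constructor
    · intro he
      exact (List.Nodup.getElem_inj_iff hnd (hi := by simpa using hm)
        (hj := by simpa using hk)).mp (by simpa using he)
    · intro he; subst he; rfl
  simp only [ne_eq, zero_add, Int.natCast_inj]
  exact not_congr key

-- ===== VERDICT (by name: the statement is the Claim_ definition above) =====
theorem make_artist_pairs_spec : Claim_equal_make_artist_pairs := by
  intro pp pn _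
  unfold Spec_make_artist_pairs
  rw [pv_portA_eq, pv_portB_eq]
  conv_lhs => rw [← PySem.List.map_snd_enumerate (pyDictItems pp) 0, List.flatMap_map]
  apply List.flatMap_congr
  intro p hp
  rw [List.filter_map, List.map_map]
  have hfil : (PySem.List.enumerate (pyDictItems pp) 0).filter
        ((fun kv' => decide (kv'.1 ≠ p.2.1 ∧ PySem.Set.len (PySem.Set.inter p.2.2 kv'.2) ≥ pn)) ∘ (fun q => q.2))
      = (PySem.List.enumerate (pyDictItems pp) 0).filter
        (fun q => decide (q.1 ≠ p.1 ∧ (pvCnt (pvIndex (pyDictItems pp)) p.2.2).getD q.1 0 ≥ pn)) := by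
    apply List.filter_congr
    intro q hq
    simp only [Function.comp]
    apply decide_eq_decide.mpr
    apply and_congr (pv_key_iff pp p q hp hq)
    rw [pv_cnt_eq_inter pp p q hq]
  rw [hfil]
  rfl
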